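-- pv_equiv track=rewrite | github.com/julienR2/BluesMyMind | source/end_generator.py | get_best_notes
-- ===== SOURCE A (Python) =====
-- def get_best_notes(list_compatible, last_note):
--     #last_note[2] = nom
--     #last_note[1] = longueur
--     final_list = []
--
--     for note in list_compatible :
--         if abs(int(last_note) - int(note)) < 7 :
--             final_list.append(note)
--
--     if len(final_list) == 0 :
--         for note in list_compatible :
--             if abs(int(last_note) - int(note)) < 14 :
--                 final_list.append(note)
--
--     return final_list
-- ===== SOURCE B (Python) =====
-- def get_best_notes(list_compatible, last_note):
--     close, medium = [], []
--     for note in list_compatible: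
--         d = abs(int(last_note) - int(note))
--         if d < 7:
--             close.append(note)
--         if d < 14:
--             medium.append(note)
--     return close if close else medium
-- ===== Notes on version B (the rewrite author's own statement) =====
-- stated objective: alternative
-- what changed: Replaces A's two conditional scans (second one only when the first found nothing) by a single pass that maintains two accumulators (diff<7 and diff<14) and picks one at the end.
import Mathlib
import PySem

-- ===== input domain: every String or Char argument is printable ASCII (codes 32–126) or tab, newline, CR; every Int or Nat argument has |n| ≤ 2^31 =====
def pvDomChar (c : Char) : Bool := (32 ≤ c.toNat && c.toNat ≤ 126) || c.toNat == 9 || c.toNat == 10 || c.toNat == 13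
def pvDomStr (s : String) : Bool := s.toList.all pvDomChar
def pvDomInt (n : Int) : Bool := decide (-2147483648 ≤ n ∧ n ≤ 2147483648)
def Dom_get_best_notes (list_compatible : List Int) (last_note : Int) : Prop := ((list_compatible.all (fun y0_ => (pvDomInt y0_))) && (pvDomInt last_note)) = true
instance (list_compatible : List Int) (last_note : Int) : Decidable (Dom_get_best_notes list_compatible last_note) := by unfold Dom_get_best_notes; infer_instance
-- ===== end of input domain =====

-- B does one pass with two accumulators instead of A's two conditional scans; same return value.

-- ===== PORT A =====
def get_best_notes (list_compatible : List Int) (last_note : Int) : List Int :=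
  let final_list := list_compatible.foldl
    (fun acc note => if |last_note - note| < 7 then acc ++ [note] else acc) []
  if final_list.length = 0 then
    list_compatible.foldl
      (fun acc note => if |last_note - note| < 14 then acc ++ [note] else acc) final_list
  else final_list

-- ===== PORT B =====
def get_best_notes_alt (list_compatible : List Int) (last_note : Int) : List Int :=
  let p := list_compatible.foldl
    (fun (acc : List Int × List Int) note =>
      let d := |last_note - note|
      let acc := if d < 7 then (acc.1 ++ [note], acc.2) else acc
      if d < 14 then (acc.1, acc.2 ++ [note]) else acc)
    ([], [])
  if p.1 ≠ [] then p.1 else p.2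

-- ===== PRECONDITION & SPEC =====
def Spec_get_best_notes (list_compatible : List Int) (last_note : Int) (out : List Int) : Prop := out = get_best_notes_alt list_compatible last_note
instance (list_compatible : List Int) (last_note : Int) (out : List Int) : Decidable (Spec_get_best_notes list_compatible last_note out) := by unfold Spec_get_best_notes; infer_instance

-- ===== CLAIM (what is proved, stated in full; the proofs are below) =====
def Claim_equal_get_best_notes : Prop := ∀ (list_compatible : List Int) (last_note : Int), Dom_get_best_notes list_compatible last_note → Spec_get_best_notes list_compatible last_note (get_best_notes list_compatible last_note)

-- ===== LEMMAS AND PROOFS =====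

-- B's pair loop computes the two filters (diff<7 and diff<14) in one pass.
theorem pairLoop_eq_filters (l : Int) (xs : List Int) (c m : List Int) :
    xs.foldl
      (fun (acc : List Int × List Int) note =>
        let d := |l - note|
        let acc := if d < 7 then (acc.1 ++ [note], acc.2) else acc
        if d < 14 then (acc.1, acc.2 ++ [note]) else acc)
      (c, m)
    = (c ++ xs.filter (fun note => |l - note| < 7),
       m ++ xs.filter (fun note => |l - note| < 14)) := by
  induction xs generalizing c m with
  | nil => simp
  | cons x xs ih =>
    simp only [List.foldl_cons, List.filter_cons]
    by_cases h7 : |l - x| < 7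
    · have h14 : |l - x| < 14 := lt_trans h7 (by norm_num)
      simp [h7, h14, ih]
    · by_cases h14 : |l - x| < 14
      · simp [h7, h14, ih]
      · simp [h7, h14, ih]

-- A's append-if loop is a filter.
theorem foldlA_eq_filter (l k : Int) (xs : List Int) (acc : List Int) :
    xs.foldl (fun acc note => if |l - note| < k then acc ++ [note] else acc) acc
    = acc ++ xs.filter (fun note => |l - note| < k) := by
  induction xs generalizing acc with
  | nil => simp
  | cons x xs ih =>
    simp only [List.foldl_cons, List.filter_cons]
    by_cases h : |l - x| < k <;> simp [h, ih]

-- ===== VERDICT (by name: the statement is the Claim_ definition above) =====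
theorem get_best_notes_spec : Claim_equal_get_best_notes := by
  intro xs l _
  unfold Spec_get_best_notes get_best_notes get_best_notes_alt
  rw [pairLoop_eq_filters]
  simp only [List.nil_append]
  rw [foldlA_eq_filter, foldlA_eq_filter]
  simp only [List.nil_append, List.length_eq_zero_iff]
  by_cases h : xs.filter (fun note => |l - note| < 7) = [] <;> simp [h]
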